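-- pv_equiv track=rewrite | github.com/ordli77/signatures | src/.ipynb_checkpoints/utils-checkpoint.py | is_ones_grouped_evenly
-- ===== SOURCE A (Python) =====
-- def is_ones_grouped_evenly(t):
--     """
--     Returns True if all 1s in the tuple appear in contiguous groups of even length.
--     Otherwise, returns False.
--     """
--     i = 0
--     while i < len(t):
--         if t[i] == 1:
--             group_start = i
--             while i < len(t) and t[i] == 1:
--                 i += 1
--             group_length = i - group_start
--             if group_length % 2 != 0:
--                 return False
--         else:
--             i += 1
--     return True
-- ===== SOURCE B (Python) =====
-- def is_ones_grouped_evenly(t):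
--     """
--     Returns True if all 1s in the tuple appear in contiguous groups of even length.
--     Single forward pass keeping the parity of the current run of 1s; no indices.
--     """
--     ok = True
--     parity = False
--     for x in t:
--         if x == 1:
--             parity = not parity
--         else:
--             ok = ok and not parity
--             parity = False
--     return ok and not parity
-- ===== Notes on version B (the rewrite author's own statement) =====
-- stated objective: simpler
-- what changed: Replaces the index-based outer/inner while-loop two-pointer scan with a single foreach pass that maintains the parity of the current 1-run in a boolean accumulator, checking it at each run boundary.
import Mathlib
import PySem

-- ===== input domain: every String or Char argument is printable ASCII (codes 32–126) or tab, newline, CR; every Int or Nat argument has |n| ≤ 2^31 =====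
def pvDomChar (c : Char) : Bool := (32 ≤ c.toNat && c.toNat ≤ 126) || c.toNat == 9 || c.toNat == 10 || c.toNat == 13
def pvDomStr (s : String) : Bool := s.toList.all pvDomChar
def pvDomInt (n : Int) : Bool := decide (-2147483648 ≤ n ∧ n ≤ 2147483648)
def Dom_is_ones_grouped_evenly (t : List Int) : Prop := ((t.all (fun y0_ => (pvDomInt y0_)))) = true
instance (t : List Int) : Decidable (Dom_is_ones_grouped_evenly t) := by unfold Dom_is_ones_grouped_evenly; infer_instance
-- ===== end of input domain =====

-- B replaces A's index-based two-pointer while-loop scan by a single foreach pass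
-- keeping the parity of the current 1-run (objective: simpler; same O(n) cost).

-- ===== PORT A =====
-- inner while: 'while i < len(t) and t[i] == 1: i += 1' — returns the final i
def pvAScan (t : List Int) (i : Nat) : Nat :=
  if h : i < t.length then
    if t[i] = 1 then pvAScan t (i + 1) else i
  else i
termination_by t.length - i

theorem pvAScan_step (t : List Int) (i : Nat) (h : i < t.length) (h1 : t[i] = 1) :
    pvAScan t i = pvAScan t (i + 1) := by
  conv_lhs => rw [pvAScan]
  rw [dif_pos h, if_pos h1]

theorem pvAScan_id_of_ne (t : List Int) (i : Nat) (h : i < t.length) (h1 : ¬ t[i] = 1) :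
    pvAScan t i = i := by
  conv_lhs => rw [pvAScan]
  rw [dif_pos h, if_neg h1]

theorem pvAScan_id_of_ge (t : List Int) (i : Nat) (h : ¬ i < t.length) :
    pvAScan t i = i := by
  conv_lhs => rw [pvAScan]
  rw [dif_neg h]

theorem pvAScan_ge (t : List Int) (i : Nat) : i ≤ pvAScan t i := by
  by_cases h : i < t.length
  · by_cases h1 : t[i] = 1
    · rw [pvAScan_step t i h h1]
      have := pvAScan_ge t (i + 1); omega
    · rw [pvAScan_id_of_ne t i h h1]
  · rw [pvAScan_id_of_ge t i h]
termination_by t.length - i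

theorem pvAScan_gt (t : List Int) (i : Nat) (h : i < t.length) (h1 : t[i] = 1) :
    i < pvAScan t i := by
  rw [pvAScan_step t i h h1]
  have := pvAScan_ge t (i + 1); omega

-- outer while over index i
def pvALoop (t : List Int) (i : Nat) : Bool :=
  if h : i < t.length then
    if h1 : t[i] = 1 then
      -- group_start = i; scan the run; group_length = new i - group_start
      if (pvAScan t i - i) % 2 ≠ 0 then false
      else pvALoop t (pvAScan t i)
    else pvALoop t (i + 1)
  else true
termination_by t.length - i
decreasing_by
  · have := pvAScan_gt t i h h1; omega
  · omega

def is_ones_grouped_evenly (t : List Int) : Bool := pvALoop t 0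

-- ===== PORT B =====
-- one pass: state (ok, parity of current 1-run); run boundary checks parity
def is_ones_grouped_evenly_alt (t : List Int) : Bool :=
  let s := t.foldl (fun (s : Bool × Bool) x =>
    if x = 1 then (s.1, !s.2) else (s.1 && !s.2, false)) (true, false)
  s.1 && !s.2

-- ===== PRECONDITION & SPEC =====
def Spec_is_ones_grouped_evenly (t : List Int) (out : Bool) : Prop := out = is_ones_grouped_evenly_alt t
instance (t : List Int) (out : Bool) : Decidable (Spec_is_ones_grouped_evenly t out) := by unfold Spec_is_ones_grouped_evenly; infer_instance

-- ===== CLAIM (what is proved, stated in full; the proofs are below) =====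
def Claim_equal_is_ones_grouped_evenly : Prop := ∀ (t : List Int), Dom_is_ones_grouped_evenly t → Spec_is_ones_grouped_evenly t (is_ones_grouped_evenly t)

-- ===== LEMMAS AND PROOFS =====

-- B's fold started from an arbitrary state, plus the final check
def pvG (l : List Int) (s : Bool × Bool) : Bool :=
  let r := l.foldl (fun (s : Bool × Bool) x =>
    if x = 1 then (s.1, !s.2) else (s.1 && !s.2, false)) s
  r.1 && !r.2

theorem pvG_alt (t : List Int) : is_ones_grouped_evenly_alt t = pvG t (true, false) := rfl

theorem pvG_cons (x : Int) (xs : List Int) (s : Bool × Bool) :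
    pvG (x :: xs) s = pvG xs (if x = 1 then (s.1, !s.2) else (s.1 && !s.2, false)) := by
  simp [pvG, List.foldl]

theorem pvG_ok_factor (l : List Int) (a p : Bool) :
    pvG l (a, p) = (a && pvG l (true, p)) := by
  induction l generalizing a p with
  | nil => cases a <;> simp [pvG]
  | cons x xs ih =>
    rw [pvG_cons, pvG_cons]
    by_cases hx : x = 1
    · simp only [if_pos hx]
      rw [ih a (!p), ih true (!p)]
    · simp only [if_neg hx]
      rw [ih (a && !p) false, ih (true && !p) false]
      cases a <;> cases p <;> simp

theorem pvAScan_stop (t : List Int) (i : Nat) :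
    ∀ h : pvAScan t i < t.length, t[pvAScan t i] ≠ 1 := by
  by_cases h : i < t.length
  · by_cases h1 : t[i] = 1
    · rw [pvAScan_step t i h h1]
      exact pvAScan_stop t (i + 1)
    · rw [pvAScan_id_of_ne t i h h1]
      intro _; exact h1
  · rw [pvAScan_id_of_ge t i h]
    intro h'; exact absurd h' h
termination_by t.length - i

-- scanning a run of 1s flips the parity (pvAScan t i - i) times
theorem pvG_scan (t : List Int) (i : Nat) (p : Bool) :
    pvG (t.drop i) (true, p)
      = pvG (t.drop (pvAScan t i)) (true, p ^^ decide ((pvAScan t i - i) % 2 = 1)) := by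
  by_cases h : i < t.length
  · by_cases h1 : t[i] = 1
    · have hscan : pvAScan t i = pvAScan t (i + 1) := pvAScan_step t i h h1
      have hge : i + 1 ≤ pvAScan t (i + 1) := pvAScan_ge t (i + 1)
      rw [List.drop_eq_getElem_cons h, pvG_cons]
      simp only [if_pos h1]
      rw [pvG_scan t (i + 1) (!p), hscan]
      congr 1
      have hm : pvAScan t (i + 1) - i = (pvAScan t (i + 1) - (i + 1)) + 1 := by omega
      rw [hm]
      rcases Nat.even_or_odd (pvAScan t (i + 1) - (i + 1)) with he | ho
      · have h2 : (pvAScan t (i + 1) - (i + 1)) % 2 = 0 := Nat.even_iff.mp he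
        have h3 : ((pvAScan t (i + 1) - (i + 1)) + 1) % 2 = 1 := by omega
        rw [h2, h3]; cases p <;> simp
      · have h2 : (pvAScan t (i + 1) - (i + 1)) % 2 = 1 := Nat.odd_iff.mp ho
        have h3 : ((pvAScan t (i + 1) - (i + 1)) + 1) % 2 = 0 := by omega
        rw [h2, h3]; cases p <;> simp
    · have hstop : pvAScan t i = i := by
        unfold pvAScan; rw [dif_pos h, if_neg h1]
      rw [hstop]; simp
  · have hstop : pvAScan t i = i := by
      unfold pvAScan; rw [dif_neg h]
    rw [hstop]; simp
termination_by t.length - i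
decreasing_by omega

-- after a run, pvG with odd parity is false (next element is not 1, or list ends)
theorem pvG_after_run_odd (t : List Int) (j : Nat)
    (hstop : ∀ h : j < t.length, t[j] ≠ 1) :
    pvG (t.drop j) (true, true) = false := by
  by_cases h : j < t.length
  · rw [List.drop_eq_getElem_cons h, pvG_cons]
    simp only [if_neg (hstop h)]
    rw [pvG_ok_factor]
    simp
  · rw [List.drop_eq_nil_of_le (by omega)]
    simp [pvG]

theorem pvALoop_eq_pvG (t : List Int) (i : Nat) :
    pvALoop t i = pvG (t.drop i) (true, false) := by
  unfold pvALoop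
  split
  · next h =>
    split
    · next h1 =>
      have hgt := pvAScan_gt t i h h1
      rw [pvG_scan t i false]
      split
      · next hodd =>
        have hp : decide ((pvAScan t i - i) % 2 = 1) = true := by
          simp only [decide_eq_true_iff]; omega
        rw [hp]
        exact (pvG_after_run_odd t (pvAScan t i) (fun h' => pvAScan_stop t i h')).symm
      · next heven =>
        have hp : decide ((pvAScan t i - i) % 2 = 1) = false := by
          simp only [decide_eq_false_iff_not]; omega
        rw [hp]
        simpa using pvALoop_eq_pvG t (pvAScan t i)
    · next h1 =>
      rw [List.drop_eq_getElem_cons h, pvG_cons]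
      simp only [if_neg h1]
      simpa using pvALoop_eq_pvG t (i + 1)
  · next h =>
    rw [List.drop_eq_nil_of_le (by omega)]
    simp [pvG]
termination_by t.length - i
decreasing_by all_goals omega

-- ===== VERDICT (by name: the statement is the Claim_ definition above) =====
theorem is_ones_grouped_evenly_spec : Claim_equal_is_ones_grouped_evenly := by
  intro t _
  unfold Spec_is_ones_grouped_evenly
  rw [pvG_alt, is_ones_grouped_evenly, pvALoop_eq_pvG]
  simp
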